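-- pv_equiv track=rewrite | github.com/LukenPaluken/AyED1-TPs | TP4/ej11.py | contar_subcadena
-- ===== SOURCE A (Python) =====
-- def contar_subcadena(cadena: str, subcadena: str) -> int:
--     cadena = cadena.lower()
--     subcadena = subcadena.lower()
--
--     count = 0
--     start = 0
--
--     while start < len(cadena):
--         temp_sub = subcadena
--         for i in range(start, len(cadena)):
--             if cadena[i] == temp_sub[0]:
--                 temp_sub = temp_sub[1:]
--                 if not temp_sub:
--                     count += 1
--                     start = i + 1
--                     break
--         else:
--             break
--
--     return count
-- ===== SOURCE B (Python) =====
-- def contar_subcadena(cadena: str, subcadena: str) -> int: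
--     cadena = cadena.lower()
--     subcadena = subcadena.lower()
--
--     count = 0
--     j = 0  # integer pointer into subcadena instead of repeated slicing
--
--     for c in cadena:
--         if c == subcadena[j]:
--             j += 1
--             if j == len(subcadena):
--                 count += 1
--                 j = 0
--
--     return count
-- ===== Notes on version B (the rewrite author's own statement) =====
-- stated objective: faster
-- what changed: Replaces the restarting while-loop with string slicing (temp_sub = temp_sub[1:]) by one single for-pass over cadena with an integer pointer into subcadena, so no substring is ever allocated.
import Mathlib
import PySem

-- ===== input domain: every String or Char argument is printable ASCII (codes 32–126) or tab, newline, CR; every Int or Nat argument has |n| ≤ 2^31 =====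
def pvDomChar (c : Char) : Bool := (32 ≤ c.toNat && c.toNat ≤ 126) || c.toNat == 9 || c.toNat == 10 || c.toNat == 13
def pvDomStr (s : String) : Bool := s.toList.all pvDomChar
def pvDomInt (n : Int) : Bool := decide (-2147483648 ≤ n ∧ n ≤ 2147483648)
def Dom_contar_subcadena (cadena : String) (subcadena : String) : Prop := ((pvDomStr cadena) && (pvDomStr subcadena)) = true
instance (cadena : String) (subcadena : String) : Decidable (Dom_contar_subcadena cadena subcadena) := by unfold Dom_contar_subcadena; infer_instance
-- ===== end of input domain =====

-- B replaces A's restarting scan with string slicing by a single pass keeping an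
-- integer pointer into subcadena (objective: faster, no substring allocations).

-- ===== PORT A =====
-- inner `for i in range(start, len(cadena))` loop of A, rendered as a walk down
-- the suffix `rem = cadena[start:]` carrying the absolute index i: it consumes
-- chars of `temp`; returns `some (i+1)` when the match completes at index i
-- (Python: count += 1; start = i + 1; break), `none` when the range is
-- exhausted (the for-else `break`).  temp = [] at a position only occurs when
-- subcadena is empty (Python raises IndexError there; excluded by Pre_).
def pvInnerA : List Char → Nat → List Char → Option Nat
  | [], _, _ => none
  | _ :: _, _, [] => none   -- Python raises IndexError here; outside Pre_
  | c :: rest, i, t :: trest =>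
    if c = t then
      if trest = [] then some (i + 1) else pvInnerA rest (i + 1) trest
    else pvInnerA rest (i + 1) (t :: trest)

-- outer `while start < len(cadena)` loop of A; `fuel` only makes the loop
-- total (start strictly increases each iteration, so `cad.length + 1` never
-- runs out)
def pvOuterA (cad sub : List Char) : Nat → Nat → Int → Int
  | 0, _, count => count
  | fuel + 1, start, count =>
    if start < cad.length then
      match pvInnerA (cad.drop start) start sub with
      | some ns => pvOuterA cad sub fuel ns (count + 1)
      | none => count
    else count

def contar_subcadena (cadena : String) (subcadena : String) : Int :=
  let cad := (PySem.Str.lower cadena).toList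
  let sub := (PySem.Str.lower subcadena).toList
  pvOuterA cad sub (cad.length + 1) 0 0

-- ===== PORT B =====
-- body of B's single `for c in cadena` loop; state = (j, count)
def pvStepB (sub : List Char) (s : Nat × Int) (c : Char) : Nat × Int :=
  if sub[s.1]? = some c then
    if s.1 + 1 = sub.length then (0, s.2 + 1) else (s.1 + 1, s.2)
  else s

def contar_subcadena_alt (cadena : String) (subcadena : String) : Int :=
  let cad := (PySem.Str.lower cadena).toList
  let sub := (PySem.Str.lower subcadena).toList
  (cad.foldl (pvStepB sub) (0, 0)).2

-- ===== PRECONDITION & SPEC =====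
-- Pre_ excludes only inputs where A (and B alike) raises IndexError:
-- an empty subcadena together with a non-empty cadena.
def Pre_contar_subcadena (cadena : String) (subcadena : String) : Prop :=
  subcadena ≠ "" ∨ cadena = ""
instance (cadena : String) (subcadena : String) : Decidable (Pre_contar_subcadena cadena subcadena) := by
  unfold Pre_contar_subcadena; infer_instance

def pvWitness_contar_subcadena : String × String := ("abcAbab", "Ab")

def Spec_contar_subcadena (cadena : String) (subcadena : String) (out : Int) : Prop := out = contar_subcadena_alt cadena subcadena
instance (cadena : String) (subcadena : String) (out : Int) : Decidable (Spec_contar_subcadena cadena subcadena out) := by unfold Spec_contar_subcadena; infer_instance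

-- ===== CLAIM (what is proved, stated in full; the proofs are below) =====
def Claim_equal_contar_subcadena : Prop := ∀ (cadena : String) (subcadena : String), Dom_contar_subcadena cadena subcadena → Pre_contar_subcadena cadena subcadena → Spec_contar_subcadena cadena subcadena (contar_subcadena cadena subcadena)

-- ===== LEMMAS AND PROOFS =====

-- A's inner scan only ever reports a new start strictly beyond the old index.
theorem pvInnerA_lt (rem : List Char) :
    ∀ (i : Nat) (temp : List Char) (j : Nat), pvInnerA rem i temp = some j → i < j := by
  induction rem with
  | nil => intro i temp j hj; simp [pvInnerA] at hj
  | cons c rest ih =>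
    intro i temp j hj
    cases temp with
    | nil => simp [pvInnerA] at hj
    | cons t trest =>
      by_cases hc : c = t
      · by_cases ht : trest = []
        · simp [pvInnerA, hc, ht] at hj; omega
        · simp only [pvInnerA, if_pos hc, if_neg ht] at hj
          have := ih (i + 1) trest j hj; omega
      · simp only [pvInnerA, if_neg hc] at hj
        have := ih (i + 1) (t :: trest) j hj; omega

-- Inner loop vs. one B-pass over the same suffix: if A's inner scan over the
-- suffix `rem` at absolute index i with remaining pattern `temp` (where
-- sub = pre ++ temp) completes at new start ns, B's fold over rem from pointer
-- pre.length equals the fold over what remains past ns from pointer 0 with the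
-- count bumped; if the scan fails, the fold leaves the count unchanged.
theorem pvInner_fold (sub : List Char) (rem : List Char) :
    ∀ (i : Nat) (pre temp : List Char), sub = pre ++ temp → temp ≠ [] → ∀ c0 : Int,
    (∀ ns, pvInnerA rem i temp = some ns →
        rem.foldl (pvStepB sub) (pre.length, c0)
          = (rem.drop (ns - i)).foldl (pvStepB sub) (0, c0 + 1))
    ∧ (pvInnerA rem i temp = none →
        (rem.foldl (pvStepB sub) (pre.length, c0)).2 = c0) := by
  induction rem with
  | nil =>
    intro i pre temp hsub hne c0
    exact ⟨fun ns hm => by simp [pvInnerA] at hm, fun _ => by simp⟩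
  | cons c rest ih =>
    intro i pre temp hsub hne c0
    cases temp with
    | nil => exact absurd rfl hne
    | cons t trest =>
      by_cases hc : c = t
      · have hget : sub[pre.length]? = some c := by subst hsub hc; simp
        by_cases ht : trest = []
        · -- match completes at index i
          have hlen : pre.length + 1 = sub.length := by subst hsub ht hc; simp
          constructor
          · intro ns hm
            have hns : ns = i + 1 := by
              simp [pvInnerA, hc, ht] at hm; omega
            subst hns
            rw [show i + 1 - i = 1 by omega]
            simp [pvStepB, hget, hlen]
          · intro hm
            simp [pvInnerA, hc, ht] at hm
        · -- char matched, pattern not finished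
          have hlen : pre.length + 1 ≠ sub.length := by
            subst hsub
            simp only [List.length_append, List.length_cons]
            have : trest.length ≠ 0 := fun hz => ht (List.eq_nil_of_length_eq_zero hz)
            omega
          have key := ih (i + 1) (pre ++ [t]) trest (by simpa using hsub) ht c0
          constructor
          · intro ns hm
            simp only [pvInnerA, if_pos hc, if_neg ht] at hm
            have hlt : i + 1 < ns := pvInnerA_lt rest (i + 1) trest ns hm
            have h1 := key.1 ns hm
            have hdrop : (c :: rest).drop (ns - i) = rest.drop (ns - (i + 1)) := by
              rw [show ns - i = (ns - (i + 1)) + 1 by omega, List.drop_succ_cons]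
            rw [List.foldl_cons, hdrop]
            simpa [pvStepB, hget, hlen, hc] using h1
          · intro hm
            simp only [pvInnerA, if_pos hc, if_neg ht] at hm
            have h2 := key.2 hm
            rw [List.foldl_cons]
            simpa [pvStepB, hget, hlen, hc] using h2
      · -- char did not match: state unchanged
        have hget : sub[pre.length]? = some t := by subst hsub; simp
        have hne' : ¬ sub[pre.length]? = some c := by
          rw [hget]; intro hcon; exact hc (by injection hcon with h'; exact h'.symm)
        have key := ih (i + 1) pre (t :: trest) hsub hne c0
        constructor
        · intro ns hm
          simp only [pvInnerA, if_neg hc] at hm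
          have hlt : i + 1 < ns := pvInnerA_lt rest (i + 1) (t :: trest) ns hm
          have h1 := key.1 ns hm
          have hdrop : (c :: rest).drop (ns - i) = rest.drop (ns - (i + 1)) := by
            rw [show ns - i = (ns - (i + 1)) + 1 by omega, List.drop_succ_cons]
          rw [List.foldl_cons, hdrop]
          simpa [pvStepB, hne'] using h1
        · intro hm
          simp only [pvInnerA, if_neg hc] at hm
          have h2 := key.2 hm
          rw [List.foldl_cons]
          simpa [pvStepB, hne'] using h2

-- Outer loop of A equals B's fold over the remaining suffix (with enough fuel).
theorem pvOuter_fold (cad sub : List Char) (hsub : sub ≠ []) :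
    ∀ (fuel start : Nat) (c0 : Int), cad.length - start < fuel →
    pvOuterA cad sub fuel start c0 = ((cad.drop start).foldl (pvStepB sub) (0, c0)).2 := by
  intro fuel
  induction fuel with
  | zero => intro start c0 h; omega
  | succ fuel ih =>
    intro start c0 hfuel
    by_cases hlt : start < cad.length
    · have key := pvInner_fold sub (cad.drop start) start [] sub rfl hsub c0
      simp only [pvOuterA, if_pos hlt]
      cases hm : pvInnerA (cad.drop start) start sub with
      | some ns =>
        have hns : start < ns := pvInnerA_lt (cad.drop start) start sub ns hm
        have h1 := key.1 ns hm
        simp only [List.length_nil] at h1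
        have hdrop : (cad.drop start).drop (ns - start) = cad.drop ns := by
          rw [List.drop_drop]; congr 1; omega
        show pvOuterA cad sub fuel ns (c0 + 1) = _
        rw [ih ns (c0 + 1) (by omega), ← hdrop, ← h1]
      | none =>
        have h2 := key.2 hm
        show c0 = _
        exact h2.symm
    · have hdrop : cad.drop start = [] := List.drop_eq_nil_of_le (by omega)
      simp [pvOuterA, hlt, hdrop]

-- ===== VERDICT (by name: the statement is the Claim_ definition above) =====
theorem contar_subcadena_spec : Claim_equal_contar_subcadena := by
  intro cadena subcadena _ hpre
  unfold Spec_contar_subcadena contar_subcadena contar_subcadena_alt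
  rcases hpre with h | h
  · have hsub : (PySem.Str.lower subcadena).toList ≠ [] := by
      rw [PySem.Str.toList_lower]
      intro hcon
      apply h
      have hnil : subcadena.toList = [] := by
        cases hl : subcadena.toList with
        | nil => rfl
        | cons a l =>
          rw [hl] at hcon
          exact absurd (congrArg List.length hcon)
            (by simp [PySem.Chars.lower])
      exact String.toList_eq_nil_iff.mp hnil
    rw [pvOuter_fold _ _ hsub _ 0 0 (by omega)]
    simp
  · subst h
    have h0 : PySem.Chars.lower ([] : List Char) = [] := by
      exact List.length_eq_zero_iff.mp (by simp [PySem.Chars.lower])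
    simp [pvOuterA, PySem.Str.toList_lower, h0]
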